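-- pv_equiv track=rewrite | github.com/SandSide/Word-Abbreviator | src/jakubek_word_abbreviator.py | find_abbreviations
-- ===== SOURCE A (Python) =====
-- def find_abbreviations(words):
--     """Find all 3 letter abbreviations for a string made out of a list of words.
--
--     Args:
--         words (List[str]): String of words to find an abbreviations for.
--
--     Returns:
--         List[str]: A list of abbreviations.
--         List(Tuple(str,str,str)): A list of position type tuples for each character in abbreviation.
--     """
--
--     # Convert words into a single word for easier manipulation
--     chars = '#'.join(words)
--     abbr_list = []
--     pos_type_list = []
--
--     # Find all 3 letter abbreviations
--     for i in range(1, len(chars) - 1):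
--         for j in range(i + 1, len(chars)):
--
--             # Create abbr
--             abbr = chars[0] + chars[i] + chars[j]
--
--             # Ignore abbr if invalid
--             if '#' in abbr:
--                 continue
--
--             abbr_list.append(abbr)
--
--             # Save pos of each char in abbr
--             pos = (0, i, j)
--
--             # Determine pos type
--             pos_types = determine_position_type(pos, chars)
--
--             pos_type_list.append(pos_types)
--
--     return abbr_list, pos_type_list
--
-- def determine_position_type(positions, chars):
--     """Determine position types for characters in an abbreviation.
--
--     Args:
--         positions (Tuple(int,int,int)): Positions of abbreviation characters.
--         chars (str): A string the abbreviation was made from.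
--
--     Returns:
--         Tuple(str,str,str): Tuple of position types.
--     """
--
--     pos_types = []
--
--
--     for x in positions:
--
--         i = int(x)
--
--         if i == 0:
--             pos_types.append('first')
--             continue
--
--         if i - 1 < 0 or chars[i - 1] == '#':
--             pos_types.append('first')
--         elif i + 1 >= len(chars) or chars[i + 1] == '#':
--             pos_types.append('last')
--         elif i - 2 < 0 or chars[i - 2] == '#':
--             pos_types.append('second')
--         elif i - 3 < 0 or chars[i - 3] == '#':
--             pos_types.append('third')
--         else:
--             pos_types.append('middle')
--
--     return pos_types
-- ===== SOURCE B (Python) =====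
-- def find_abbreviations(words):
--     """Find all 3 letter abbreviations for a string made out of a list of words.
--
--     Different decomposition: precompute a position-type table and the list of
--     valid (non-'#') indices once, then emit one combination pass over that list.
--     """
--     chars = '#'.join(words)
--     n = len(chars)
--     if n == 0 or chars[0] == '#':
--         return [], []
--     ptype = [_position_type(chars, i) for i in range(n)]
--     valid = [i for i in range(1, n) if chars[i] != '#']
--     pairs = _pairs(valid)
--     abbrs = [chars[0] + chars[i] + chars[j] for i, j in pairs]
--     types = [[ptype[0], ptype[i], ptype[j]] for i, j in pairs]
--     return abbrs, types
--
--
-- def _position_type(chars, i):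
--     """Position type of index i inside the '#'-joined string."""
--     if i == 0 or chars[i - 1] == '#':
--         return 'first'
--     if i + 1 >= len(chars) or chars[i + 1] == '#':
--         return 'last'
--     if i < 2 or chars[i - 2] == '#':
--         return 'second'
--     if i < 3 or chars[i - 3] == '#':
--         return 'third'
--     return 'middle'
--
--
-- def _pairs(xs):
--     """All ordered combinations (xs[a], xs[b]) with a < b, in order."""
--     out = []
--     rest = xs
--     while rest:
--         x = rest[0]
--         rest = rest[1:]
--         for y in rest:
--             out.append((x, y))
--     return out
-- ===== Notes on version B (the rewrite author's own statement) =====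
-- stated objective: alternative
-- what changed: Replaces A's nested index loops with per-pair skip-continue and a per-pair helper call by a guarded decomposition: precompute the position-type table and the list of valid (non-'#') indices once, then generate all index combinations of that list in one pass (constant-factor win: no per-pair helper calls and '#' pairs are never enumerated).
import Mathlib
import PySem

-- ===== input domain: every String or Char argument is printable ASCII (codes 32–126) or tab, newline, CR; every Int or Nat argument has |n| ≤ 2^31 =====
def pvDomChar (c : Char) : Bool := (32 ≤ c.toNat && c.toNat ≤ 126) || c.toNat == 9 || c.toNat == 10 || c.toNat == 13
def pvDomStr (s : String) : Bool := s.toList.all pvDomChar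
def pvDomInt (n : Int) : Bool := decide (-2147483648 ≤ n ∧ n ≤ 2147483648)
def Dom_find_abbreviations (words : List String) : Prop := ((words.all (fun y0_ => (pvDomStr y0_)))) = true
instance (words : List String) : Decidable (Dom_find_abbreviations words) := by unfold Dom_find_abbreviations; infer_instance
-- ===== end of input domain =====

-- B replaces A's nested index loops with skip-continue by a precomputed position-type
-- table plus one combination pass over the list of valid indices (alternative decomposition).

-- ===== PORT A =====
-- port of determine_position_type (positions are the nonnegative ints (0, i, j))
def pvDetPosType (positions : List Nat) (chars : List Char) : List String :=
  positions.foldl (fun acc i =>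
    acc ++ [ if i = 0 then "first"
             else if chars.getD (i - 1) ' ' = '#' then "first"
             else if chars.length ≤ i + 1 ∨ chars.getD (i + 1) ' ' = '#' then "last"
             else if i < 2 ∨ chars.getD (i - 2) ' ' = '#' then "second"
             else if i < 3 ∨ chars.getD (i - 3) ' ' = '#' then "third"
             else "middle" ]) []

def find_abbreviations (words : List String) : List String × List (List String) :=
  let chars := (PySem.Str.join "#" words).toList
  let n := chars.length
  (List.range' 1 (n - 1 - 1)).foldl (fun st i =>
    (List.range' (i + 1) (n - (i + 1))).foldl (fun st j =>
      let abbr := [chars.getD 0 ' ', chars.getD i ' ', chars.getD j ' ']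
      if '#' ∈ abbr then st
      else (st.1 ++ [String.mk abbr], st.2 ++ [pvDetPosType [0, i, j] chars])) st)
    ([], [])

-- ===== PORT B =====
-- port of _position_type
def pvPosType (chars : List Char) (i : Nat) : String :=
  if i = 0 ∨ chars.getD (i - 1) ' ' = '#' then "first"
  else if chars.length ≤ i + 1 ∨ chars.getD (i + 1) ' ' = '#' then "last"
  else if i < 2 ∨ chars.getD (i - 2) ' ' = '#' then "second"
  else if i < 3 ∨ chars.getD (i - 3) ' ' = '#' then "third"
  else "middle"

-- port of _pairs (the while loop over the shrinking `rest`, with accumulator `out`)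
def pvPairsGo (rest : List Nat) (out : List (Nat × Nat)) : List (Nat × Nat) :=
  match rest with
  | [] => out
  | x :: r => pvPairsGo r (out ++ r.map (fun y => (x, y)))

def find_abbreviations_alt (words : List String) : List String × List (List String) :=
  let chars := (PySem.Str.join "#" words).toList
  let n := chars.length
  if n = 0 ∨ chars.getD 0 ' ' = '#' then ([], [])
  else
    let pt := (List.range n).map (pvPosType chars)
    let valid := (List.range' 1 (n - 1)).filter (fun i => chars.getD i ' ' ≠ '#')
    let pairs := pvPairsGo valid []
    (pairs.map (fun p => String.mk [chars.getD 0 ' ', chars.getD p.1 ' ', chars.getD p.2 ' ']),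
     pairs.map (fun p => [pt.getD 0 "", pt.getD p.1 "", pt.getD p.2 ""]))

-- ===== PRECONDITION & SPEC =====
def Spec_find_abbreviations (words : List String) (out : List String × List (List String)) : Prop := out = find_abbreviations_alt words
instance (words : List String) (out : List String × List (List String)) : Decidable (Spec_find_abbreviations words out) := by unfold Spec_find_abbreviations; infer_instance

-- ===== CLAIM (what is proved, stated in full; the proofs are below) =====
def Claim_equal_find_abbreviations : Prop := ∀ (words : List String), Dom_find_abbreviations words → Spec_find_abbreviations words (find_abbreviations words)

-- ===== LEMMAS AND PROOFS =====

-- clean combinations function (proof-side)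
def pvCombos : List Nat → List (Nat × Nat)
  | [] => []
  | x :: r => r.map (fun y => (x, y)) ++ pvCombos r

theorem pvPairsGo_eq (rest : List Nat) (out : List (Nat × Nat)) :
    pvPairsGo rest out = out ++ pvCombos rest := by
  induction rest generalizing out with
  | nil => simp [pvPairsGo, pvCombos]
  | cons x r ih => simp [pvPairsGo, pvCombos, ih]

-- inner skip-loop shape
theorem pv_foldl_skip {β γ : Type} (cond : Nat → Prop) [DecidablePred cond]
    (f : Nat → β) (g : Nat → γ) (l : List Nat) (st : List β × List γ) :
    l.foldl (fun st j => if cond j then st else (st.1 ++ [f j], st.2 ++ [g j])) st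
      = (st.1 ++ (l.filter (fun j => decide ¬ cond j)).map f,
         st.2 ++ (l.filter (fun j => decide ¬ cond j)).map g) := by
  induction l generalizing st with
  | nil => simp
  | cons x l ih =>
    by_cases hx : cond x <;> simp [List.foldl_cons, hx, ih]

-- outer append-loop shape
theorem pv_foldl_pair_append {β γ : Type} (u : Nat → List β) (v : Nat → List γ)
    (l : List Nat) (st : List β × List γ) :
    l.foldl (fun st i => (st.1 ++ u i, st.2 ++ v i)) st
      = (st.1 ++ l.flatMap u, st.2 ++ l.flatMap v) := by
  induction l generalizing st with
  | nil => simp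
  | cons x l ih => simp [List.foldl_cons, ih]

-- combinations of a filtered range, as a flatMap over the range
theorem pvCombos_filter_range (q : Nat → Bool) :
    ∀ (m s : Nat), pvCombos ((List.range' s m).filter q)
      = (List.range' s m).flatMap (fun i =>
          if q i then ((List.range' (i + 1) (s + m - i - 1)).filter q).map (fun j => (i, j))
          else []) := by
  intro m
  induction m with
  | zero => intro s; simp [pvCombos]
  | succ m ih =>
    intro s
    have hrest : pvCombos ((List.range' (s + 1) m).filter q)
        = (List.range' (s + 1) m).flatMap (fun i =>
            if q i then ((List.range' (i + 1) (s + (m + 1) - i - 1)).filter q).map (fun j => (i, j))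
            else []) := by
      rw [ih (s + 1)]
      apply List.flatMap_congr
      intro x _
      have h2 : s + 1 + m - x - 1 = s + (m + 1) - x - 1 := by omega
      rw [h2]
    rw [List.range'_succ, List.flatMap_cons, List.filter_cons]
    by_cases hs : q s = true
    · have h1 : s + (m + 1) - s - 1 = m := by omega
      simp only [hs, if_pos, pvCombos, hrest, h1]
    · simp only [hs, Bool.false_eq_true, if_false, hrest]
      simp

-- the three-element helper of A, expressed through B's per-index helper
theorem pvDet_eq (chars : List Char) (i j : Nat) :
    pvDetPosType [0, i, j] chars
      = [pvPosType chars 0, pvPosType chars i, pvPosType chars j] := by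
  have h : ∀ x : Nat,
      (if x = 0 then "first"
       else if chars.getD (x - 1) ' ' = '#' then "first"
       else if chars.length ≤ x + 1 ∨ chars.getD (x + 1) ' ' = '#' then "last"
       else if x < 2 ∨ chars.getD (x - 2) ' ' = '#' then "second"
       else if x < 3 ∨ chars.getD (x - 3) ' ' = '#' then "third"
       else "middle") = pvPosType chars x := by
    intro x
    unfold pvPosType
    by_cases h0 : x = 0
    · simp [h0]
    · by_cases h1 : chars.getD (x - 1) ' ' = '#' <;> simp [h0]
  simp only [pvDetPosType, List.foldl_cons, List.foldl_nil, List.nil_append,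
    List.cons_append, h]

-- lookup in the precomputed table
theorem pv_pt_getD (chars : List Char) (k : Nat) (hk : k < chars.length) :
    ((List.range chars.length).map (pvPosType chars)).getD k "" = pvPosType chars k := by
  simp [List.getD_eq_getElem?_getD, hk]

theorem pv_main (chars : List Char) :
    (List.range' 1 (chars.length - 1 - 1)).foldl (fun st i =>
      (List.range' (i + 1) (chars.length - (i + 1))).foldl (fun st j =>
        let abbr := [chars.getD 0 ' ', chars.getD i ' ', chars.getD j ' ']
        if '#' ∈ abbr then st
        else (st.1 ++ [String.mk abbr], st.2 ++ [pvDetPosType [0, i, j] chars])) st)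
      ([], [])
  = (if chars.length = 0 ∨ chars.getD 0 ' ' = '#' then (([], []) : List String × List (List String))
    else
      let pt := (List.range chars.length).map (pvPosType chars)
      let valid := (List.range' 1 (chars.length - 1)).filter (fun i => chars.getD i ' ' ≠ '#')
      let pairs := pvPairsGo valid []
      (pairs.map (fun p => String.mk [chars.getD 0 ' ', chars.getD p.1 ' ', chars.getD p.2 ' ']),
       pairs.map (fun p => [pt.getD 0 "", pt.getD p.1 "", pt.getD p.2 ""]))) := by
  have hfun : (fun (st : List String × List (List String)) (i : Nat) =>
      (List.range' (i + 1) (chars.length - (i + 1))).foldl (fun st j =>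
        let abbr := [chars.getD 0 ' ', chars.getD i ' ', chars.getD j ' ']
        if '#' ∈ abbr then st
        else (st.1 ++ [String.mk abbr], st.2 ++ [pvDetPosType [0, i, j] chars])) st)
    = (fun st i =>
      (st.1 ++ ((List.range' (i + 1) (chars.length - (i + 1))).filter
          (fun j => decide ¬('#' ∈ [chars.getD 0 ' ', chars.getD i ' ', chars.getD j ' ']))).map
          (fun j => String.mk [chars.getD 0 ' ', chars.getD i ' ', chars.getD j ' ']),
       st.2 ++ ((List.range' (i + 1) (chars.length - (i + 1))).filter
          (fun j => decide ¬('#' ∈ [chars.getD 0 ' ', chars.getD i ' ', chars.getD j ' ']))).map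
          (fun j => pvDetPosType [0, i, j] chars))) := by
    funext st i
    exact pv_foldl_skip
      (fun j => '#' ∈ [chars.getD 0 ' ', chars.getD i ' ', chars.getD j ' ']) _ _ _ _
  rw [hfun, pv_foldl_pair_append]
  simp only [List.nil_append]
  by_cases hz : chars.length = 0 ∨ chars.getD 0 ' ' = '#'
  · rw [if_pos hz]
    rcases hz with hn0 | hc
    · simp [hn0]
    · have hc' : chars[0]?.getD ' ' = '#' := by
        simpa [List.getD_eq_getElem?_getD] using hc
      simp [hc']
  · rw [if_neg hz]
    push_neg at hz
    obtain ⟨hn0, hc0⟩ := hz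
    simp only [pvPairsGo_eq, List.nil_append]
    rw [pvCombos_filter_range]
    rcases Nat.lt_or_ge chars.length 2 with h2 | h2
    · -- chars.length = 1: everything is empty
      have h1 : chars.length - 1 = 0 := by omega
      have h1' : chars.length - 1 - 1 = 0 := by omega
      simp [h1]
    · -- chars.length ≥ 2
      have hb : ∀ i ∈ List.range' 1 (chars.length - 1),
          (if (decide (chars.getD i ' ' ≠ '#')) = true then
             ((List.range' (i + 1) (1 + (chars.length - 1) - i - 1)).filter
               (fun i => decide (chars.getD i ' ' ≠ '#'))).map (fun j => (i, j))
           else [])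
          = (if (decide (chars.getD i ' ' ≠ '#')) = true then
             ((List.range' (i + 1) (chars.length - (i + 1))).filter
               (fun i => decide (chars.getD i ' ' ≠ '#'))).map (fun j => (i, j))
           else []) := by
        intro i _
        have : 1 + (chars.length - 1) - i - 1 = chars.length - (i + 1) := by omega
        rw [this]
      rw [List.flatMap_congr hb]
      have hsplit : List.range' 1 (chars.length - 1)
          = List.range' 1 (chars.length - 1 - 1) ++ [chars.length - 1] := by
        have h' : chars.length - 1 = (chars.length - 1 - 1) + 1 := by omega
        conv_lhs => rw [h']
        rw [List.range'_concat]
        have h'' : 1 + 1 * (chars.length - 1 - 1) = chars.length - 1 := by omega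
        rw [h'']
      rw [hsplit, List.flatMap_append]
      have hlast : (List.flatMap (fun i =>
          if (decide (chars.getD i ' ' ≠ '#')) = true then
            ((List.range' (i + 1) (chars.length - (i + 1))).filter
              (fun i => decide (chars.getD i ' ' ≠ '#'))).map (fun j => (i, j))
          else []) [chars.length - 1]) = [] := by
        have hx : chars.length - (chars.length - 1 + 1) = 0 := by omega
        simp [hx]
      rw [hlast, List.append_nil]
      rw [List.map_flatMap, List.map_flatMap]
      simp only [Prod.mk.injEq]
      have hnil : ∀ i : Nat, chars.getD i ' ' = '#' →
          (List.range' (i + 1) (chars.length - (i + 1))).filter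
            (fun j => decide ('#' ∉ [chars.getD 0 ' ', chars.getD i ' ', chars.getD j ' '])) = [] := by
        intro i hqi
        apply List.filter_eq_nil_iff.mpr
        intro j _
        simp only [decide_eq_true_eq, List.mem_cons]
        exact not_not_intro (Or.inr (Or.inl hqi.symm))
      have hfilt : ∀ i : Nat, ¬ chars.getD i ' ' = '#' →
          (List.range' (i + 1) (chars.length - (i + 1))).filter
            (fun j => decide ('#' ∉ [chars.getD 0 ' ', chars.getD i ' ', chars.getD j ' ']))
          = (List.range' (i + 1) (chars.length - (i + 1))).filter
            (fun j => decide (chars.getD j ' ' ≠ '#')) := by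
        intro i hqi
        apply List.filter_congr
        intro j _
        apply decide_eq_decide.mpr
        simp only [List.mem_cons, not_or]
        constructor
        · rintro ⟨-, -, h, -⟩ hh; exact h hh.symm
        · intro h
          exact ⟨fun hh => hc0 hh.symm, fun hh => hqi hh.symm, fun hh => h hh.symm, by simp⟩
      constructor
      · apply List.flatMap_congr
        intro i _
        by_cases hqi : chars.getD i ' ' = '#'
        · rw [hnil i hqi, if_neg]
          · simp
          · rw [decide_eq_false (not_not_intro hqi)]
            simp
        · rw [if_pos (decide_eq_true hqi), hfilt i hqi, List.map_map]
          rfl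
      · apply List.flatMap_congr
        intro i hi
        have hi' : i < chars.length := by
          rw [List.mem_range'_1] at hi; omega
        by_cases hqi : chars.getD i ' ' = '#'
        · rw [hnil i hqi, if_neg]
          · simp
          · rw [decide_eq_false (not_not_intro hqi)]
            simp
        · rw [if_pos (decide_eq_true hqi), hfilt i hqi, List.map_map]
          apply List.map_congr_left
          intro j hj
          have hj' : j < chars.length := by
            have := List.mem_of_mem_filter hj
            rw [List.mem_range'_1] at this; omega
          simp only [Function.comp]
          rw [pvDet_eq, pv_pt_getD chars 0 (by omega), pv_pt_getD chars i hi',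
            pv_pt_getD chars j hj']

-- ===== VERDICT (by name: the statement is the Claim_ definition above) =====
theorem find_abbreviations_spec : Claim_equal_find_abbreviations := by
  intro words _
  unfold Spec_find_abbreviations
  simp only [find_abbreviations, find_abbreviations_alt]
  exact pv_main _
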